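-- pv_equiv track=rewrite | github.com/bellshade/Python | matrix/matriks_special.py | hankel
-- ===== SOURCE A (Python) =====
-- from typing import Union
--
-- def hankel(A, b=1) -> list[list[Union[int, float]]]:
--     """
--     Membuat matriks hankel
--
--     >>> hankel(3)
--     [[1, 2, 3], [2, 3, 4], [3, 4, 5]]
--     """
--     res = []
--     for i in range(b, A + 1):
--         row = []
--         for j in range(b, A + 1):
--             row.append(i + j - 1)
--         res.append(row)
--     return res
-- ===== SOURCE B (Python) =====
-- def hankel(A, b=1):
--     n = A - b + 1
--     c = list(range(2 * b - 1, 2 * A))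
--     return [c[r : r + n] for r in range(n)]
-- ===== Notes on version B (the rewrite author's own statement) =====
-- stated objective: alternative
-- what changed: B computes the shared anti-diagonal sequence c = range(2*b-1, 2*A) once and builds every row as an offset slice c[r:r+n], replacing A's nested loops that recompute i+j-1 cell by cell.
import Mathlib
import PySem

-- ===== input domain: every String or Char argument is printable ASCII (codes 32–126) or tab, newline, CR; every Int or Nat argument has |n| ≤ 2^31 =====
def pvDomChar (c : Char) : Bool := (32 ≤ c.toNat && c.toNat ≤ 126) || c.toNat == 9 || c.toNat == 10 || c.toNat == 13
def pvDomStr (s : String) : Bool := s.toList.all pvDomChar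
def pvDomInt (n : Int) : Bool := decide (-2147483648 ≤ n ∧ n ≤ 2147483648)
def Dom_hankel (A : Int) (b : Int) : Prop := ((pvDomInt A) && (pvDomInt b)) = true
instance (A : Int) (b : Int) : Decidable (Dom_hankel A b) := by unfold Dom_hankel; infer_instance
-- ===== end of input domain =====

-- B builds the 2n-1 anti-diagonal values once and derives each row by offset-slicing,
-- instead of A's nested loops recomputing i+j-1 cell by cell (objective: alternative decomposition).

-- ===== PORT A =====
def hankel (A : Int) (b : Int) : List (List Int) :=
  (PySem.List.pyRange b (A + 1) 1).foldl
    (fun res i =>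
      res ++ [(PySem.List.pyRange b (A + 1) 1).foldl (fun row j => row ++ [i + j - 1]) []])
    []

-- ===== PORT B =====
def hankel_alt (A : Int) (b : Int) : List (List Int) :=
  let n : Int := A - b + 1
  let c : List Int := PySem.List.pyRange (2 * b - 1) (2 * A) 1
  (PySem.List.pyRange 0 n 1).map (fun r => PySem.List.slice c (some r) (some (r + n)))

-- ===== PRECONDITION & SPEC =====
def Spec_hankel (A : Int) (b : Int) (out : List (List Int)) : Prop := out = hankel_alt A b
instance (A : Int) (b : Int) (out : List (List Int)) : Decidable (Spec_hankel A b out) := by unfold Spec_hankel; infer_instance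

-- ===== CLAIM (what is proved, stated in full; the proofs are below) =====
def Claim_equal_hankel : Prop := ∀ (A : Int) (b : Int), Dom_hankel A b → Spec_hankel A b (hankel A b)

-- ===== LEMMAS AND PROOFS =====

theorem foldl_push {α β : Type} (f : α → β) (l : List α) (init : List β) :
    l.foldl (fun acc x => acc ++ [f x]) init = init ++ l.map f := by
  induction l generalizing init with
  | nil => simp
  | cons x xs ih => simp [List.foldl_cons, ih]

theorem hankel_as_map (A b : Int) :
    hankel A b =
      (PySem.List.pyRange b (A + 1) 1).map (fun i =>
        (PySem.List.pyRange b (A + 1) 1).map (fun j => i + j - 1)) := by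
  unfold hankel
  rw [foldl_push]
  simp only [List.nil_append]
  apply List.map_congr_left
  intro i _
  rw [foldl_push]
  simp

-- ===== VERDICT (by name: the statement is the Claim_ definition above) =====
theorem hankel_spec : Claim_equal_hankel := by
  intro A b _
  unfold Spec_hankel hankel_alt
  rw [hankel_as_map]
  simp only
  apply List.ext_getElem
  · simp [PySem.List.length_pyRange_one]
    omega
  · intro r h1 h2
    simp only [List.getElem_map]
    rw [PySem.List.getElem_pyRange_one, PySem.List.getElem_pyRange_one]
    have hr : r < (A + 1 - b).toNat := by
      simpa [PySem.List.length_pyRange_one] using h1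
    have hst : (0 : Int) + (r : Int) + (A - b + 1) = ((r : Nat) : Int) + (((A + 1 - b).toNat : Nat) : Int) := by
      omega
    rw [show (0 : Int) + (r : Int) = ((r : Nat) : Int) from by omega] at *
    rw [hst, PySem.List.slice_natCast_add]
    apply List.ext_getElem
    · simp [PySem.List.length_pyRange_one]
      omega
    · intro k k1 k2
      simp only [List.getElem_map, List.getElem_take, List.getElem_drop]
      rw [PySem.List.getElem_pyRange_one, PySem.List.getElem_pyRange_one]
      have : k < (A + 1 - b).toNat := by
        simpa [PySem.List.length_pyRange_one] using k1
      push_cast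
      omega
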